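-- pv_equiv track=rewrite | github.com/Sanyab001/ProjectEuler | 5.py | check_devision_new
-- ===== SOURCE A (Python) =====
-- def check_devision_new(n):
--     l = [3, 4, 6, 7, 8, 9, 11, 12, 13, 14, 15, 16, 17, 18, 19]
--     for i in l:
--         if n % i == 0 and i == 19:
--             return True
--         elif n % i == 0:
--             i += 1
--         else:
--             return False
-- ===== SOURCE B (Python) =====
-- def check_devision_new(n):
--     # lcm(3,4,6,7,8,9,11,12,13,14,15,16,17,18,19) = 232792560
--     return n % 232792560 == 0
-- ===== Notes on version B (the rewrite author's own statement) =====
-- stated objective: simpler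
-- what changed: Replaced the element-by-element divisibility loop over the divisor list with a single modulo check against their precomputed LCM 232792560.
import Mathlib
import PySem

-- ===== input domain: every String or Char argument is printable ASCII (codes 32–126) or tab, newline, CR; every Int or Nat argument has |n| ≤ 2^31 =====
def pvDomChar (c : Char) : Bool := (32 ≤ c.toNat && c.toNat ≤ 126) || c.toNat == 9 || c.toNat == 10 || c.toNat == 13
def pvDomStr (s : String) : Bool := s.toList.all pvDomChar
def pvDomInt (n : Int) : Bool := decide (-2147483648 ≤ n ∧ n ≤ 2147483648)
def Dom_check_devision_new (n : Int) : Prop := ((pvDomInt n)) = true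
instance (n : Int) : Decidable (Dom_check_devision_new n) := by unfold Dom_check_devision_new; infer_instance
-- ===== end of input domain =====

-- B replaces A's per-element divisibility loop with one modulo check against the LCM 232792560 (simpler).

-- ===== PORT A =====
-- the for loop with early returns, as structural recursion over the list
-- (the Python fall-through `return None` is unreachable: 19 is the last element and both
--  branches on it return; `[] => false` stands for that unreachable exit)
def chkLoopA (n : Int) : List Int → Bool
  | [] => false
  | i :: rest =>
    if PySem.Int.mod n i == 0 && i == 19 then true
    else if PySem.Int.mod n i == 0 then chkLoopA n rest
    else false

def check_devision_new (n : Int) : Bool :=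
  chkLoopA n [3, 4, 6, 7, 8, 9, 11, 12, 13, 14, 15, 16, 17, 18, 19]

-- ===== PORT B =====
def check_devision_new_alt (n : Int) : Bool :=
  PySem.Int.mod n 232792560 == 0

-- ===== PRECONDITION & SPEC =====
def Spec_check_devision_new (n : Int) (out : Bool) : Prop := out = check_devision_new_alt n
instance (n : Int) (out : Bool) : Decidable (Spec_check_devision_new n out) := by unfold Spec_check_devision_new; infer_instance

-- ===== CLAIM (what is proved, stated in full; the proofs are below) =====
def Claim_equal_check_devision_new : Prop := ∀ (n : Int), Dom_check_devision_new n → Spec_check_devision_new n (check_devision_new n)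

-- ===== LEMMAS AND PROOFS =====

-- ===== VERDICT (by name: the statement is the Claim_ definition above) =====
set_option maxHeartbeats 1000000 in
theorem check_devision_new_spec : Claim_equal_check_devision_new := by
  intro n _
  unfold Spec_check_devision_new check_devision_new check_devision_new_alt
  have key : ∀ i : Int, (PySem.Int.mod n i == 0) = decide (i ∣ n) := by
    intro i
    by_cases hd : i ∣ n
    · have hm : PySem.Int.mod n i = 0 := (PySem.Int.mod_eq_zero_iff_dvd _ _).mpr hd
      simp [hm, hd]
    · have hm : PySem.Int.mod n i ≠ 0 := fun hc => hd ((PySem.Int.mod_eq_zero_iff_dvd _ _).mp hc)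
      simp [hm, hd]
  simp only [chkLoopA, key]
  norm_num
  rw [Bool.eq_iff_iff]
  simp only [Bool.and_eq_true, decide_eq_true_eq]
  constructor
  · rintro ⟨h3, h4, h6, h7, h8, h9, h11, h12, h13, h14, h15, h16, h17, h18, h19⟩
    have h5 : (5 : Int) ∣ n := dvd_trans (by norm_num) h15
    have cop : ∀ a b : Int, Int.gcd a b = 1 → IsCoprime a b := by
      intro a b hab; exact Int.isCoprime_iff_gcd_eq_one.mpr hab
    have d1 : (144 : Int) ∣ n := (cop 16 9 (by decide)).mul_dvd h16 h9
    have d2 : (720 : Int) ∣ n := (cop 144 5 (by decide)).mul_dvd d1 h5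
    have d3 : (5040 : Int) ∣ n := (cop 720 7 (by decide)).mul_dvd d2 h7
    have d4 : (55440 : Int) ∣ n := (cop 5040 11 (by decide)).mul_dvd d3 h11
    have d5 : (720720 : Int) ∣ n := (cop 55440 13 (by decide)).mul_dvd d4 h13
    have d6 : (12252240 : Int) ∣ n := (cop 720720 17 (by decide)).mul_dvd d5 h17
    exact (cop 12252240 19 (by decide)).mul_dvd d6 h19
  · intro h
    refine ⟨?_, ?_, ?_, ?_, ?_, ?_, ?_, ?_, ?_, ?_, ?_, ?_, ?_, ?_, ?_⟩ <;>
      exact dvd_trans (by norm_num) h
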